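-- pv_equiv track=rewrite | github.com/alisdt/online_experiments_course | example_src/boilerplate_producer.py | plugin_js_to_url
-- ===== SOURCE A (Python) =====
-- def plugin_js_to_url(plugin_js):
--     # e.g. jsPsychImageKeyboardResponse -> plugin-image-keyboard-response
--     assert plugin_js[:7] == "jsPsych", f"Plugin name that doesn't start with jsPsych: {plugin_js}"
--     plugin_js = plugin_js[7:]
--     words = []
--     current_word = plugin_js[0]
--     for letter in plugin_js[1:]:
--         if letter.isupper(): # start a new word
--             words.append(current_word)
--             current_word = ""
--         current_word += letter
--     words.append(current_word) # and get the last one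
--     return "plugin-"+"-".join(w.lower() for w in words)
-- ===== SOURCE B (Python) =====
-- def plugin_js_to_url(plugin_js):
--     # e.g. jsPsychImageKeyboardResponse -> plugin-image-keyboard-response
--     assert plugin_js[:7] == "jsPsych", f"Plugin name that doesn't start with jsPsych: {plugin_js}"
--     rest = plugin_js[7:]
--     # stream the characters directly: an uppercase letter (after the first
--     # character) emits a hyphen before its lowered form; no word list is built
--     return "plugin-" + rest[0].lower() + "".join(
--         ("-" + c.lower()) if c.isupper() else c.lower() for c in rest[1:]
--     )
-- ===== Notes on version B (the rewrite author's own statement) =====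
-- stated objective: simpler
-- what changed: B drops A's word-list accumulator (words/current_word plus a final join) and instead streams the remainder once, emitting '-'+char.lower() for each uppercase letter after the first character, concatenated directly onto the 'plugin-' prefix.
import Mathlib
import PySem

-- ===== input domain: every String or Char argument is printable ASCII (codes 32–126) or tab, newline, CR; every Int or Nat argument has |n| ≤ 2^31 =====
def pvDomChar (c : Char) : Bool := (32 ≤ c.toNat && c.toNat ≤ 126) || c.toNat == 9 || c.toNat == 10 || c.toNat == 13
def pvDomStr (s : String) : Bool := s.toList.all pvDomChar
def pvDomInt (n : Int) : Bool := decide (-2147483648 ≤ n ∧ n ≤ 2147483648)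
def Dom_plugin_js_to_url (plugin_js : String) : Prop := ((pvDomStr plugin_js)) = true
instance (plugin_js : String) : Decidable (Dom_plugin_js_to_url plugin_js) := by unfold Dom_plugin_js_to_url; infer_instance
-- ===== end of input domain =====

-- B streams the characters once (hyphen+lower per uppercase letter) instead of
-- accumulating a word list and joining it; objective: simpler. Equivalence is
-- about the return value; neither version mutates its argument observably.

-- ===== PORT A =====
-- the loop body of A: maintain (finished words, current word)
def pvStepA (st : List (List Char) × List Char) (letter : Char) : List (List Char) × List Char :=
  if PySem.Chars.isupper letter then (st.1 ++ [st.2], [letter]) else (st.1, st.2 ++ [letter])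

def plugin_js_to_url (plugin_js : String) : String :=
  let s := plugin_js.toList
  if PySem.List.slice s none (some 7) = "jsPsych".toList then  -- assert plugin_js[:7] == "jsPsych"
    let rest := PySem.List.slice s (some 7) none               -- plugin_js = plugin_js[7:]
    match PySem.List.pyGet? rest 0 with                        -- current_word = plugin_js[0]
    | none => ""   -- IndexError (empty remainder; excluded by Pre_)
    | some c0 =>
      let st := (PySem.List.slice rest (some 1) none).foldl pvStepA ([], [c0])
      let words := st.1 ++ [st.2]                              -- words.append(current_word)
      String.ofList ("plugin-".toList ++ PySem.Chars.join ['-'] (words.map PySem.Chars.lower))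
  else ""  -- AssertionError (excluded by Pre_)

-- ===== PORT B =====
-- per-character emission of B's comprehension
def pvEmitB (c : Char) : List Char :=
  if PySem.Chars.isupper c then ['-', PySem.Chars.lowerChar c] else [PySem.Chars.lowerChar c]

def plugin_js_to_url_alt (plugin_js : String) : String :=
  let s := plugin_js.toList
  if PySem.List.slice s none (some 7) = "jsPsych".toList then  -- assert plugin_js[:7] == "jsPsych"
    let rest := PySem.List.slice s (some 7) none               -- rest = plugin_js[7:]
    match PySem.List.pyGet? rest 0 with                        -- rest[0] (IndexError if empty)
    | none => ""   -- IndexError (empty remainder; excluded by Pre_)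
    | some c0 =>
      String.ofList ("plugin-".toList ++ [PySem.Chars.lowerChar c0] ++
        (PySem.List.slice rest (some 1) none).flatMap pvEmitB)
  else ""  -- AssertionError (excluded by Pre_)

-- ===== PRECONDITION & SPEC =====
-- Pre_ excludes exactly the inputs where A raises: the assert fires unless the
-- string starts with "jsPsych", and plugin_js[7:][0] raises IndexError unless
-- at least one character follows that prefix.
def Pre_plugin_js_to_url (plugin_js : String) : Prop :=
  PySem.Str.startswith plugin_js "jsPsych" = true ∧ 8 ≤ plugin_js.toList.length
instance (plugin_js : String) : Decidable (Pre_plugin_js_to_url plugin_js) := by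
  unfold Pre_plugin_js_to_url; infer_instance

def pvWitness_plugin_js_to_url : String := "jsPsychImageKeyboardResponse"

def Spec_plugin_js_to_url (plugin_js : String) (out : String) : Prop := out = plugin_js_to_url_alt plugin_js
instance (plugin_js : String) (out : String) : Decidable (Spec_plugin_js_to_url plugin_js out) := by unfold Spec_plugin_js_to_url; infer_instance

-- ===== CLAIM (what is proved, stated in full; the proofs are below) =====
def Claim_equal_plugin_js_to_url : Prop := ∀ (plugin_js : String), Dom_plugin_js_to_url plugin_js → Pre_plugin_js_to_url plugin_js → Spec_plugin_js_to_url plugin_js (plugin_js_to_url plugin_js)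

-- ===== LEMMAS AND PROOFS =====

-- join over a cons with nonempty tail
theorem pv_join_cons (p : List Char) (rest : List (List Char)) (h : rest ≠ []) :
    PySem.Chars.join ['-'] (p :: rest) = p ++ '-' :: PySem.Chars.join ['-'] rest := by
  cases rest with
  | nil => exact absurd rfl h
  | cons q t => rw [PySem.Chars.join_cons_cons]; simp

-- appending a fresh word to a nonempty word list
theorem pv_join_snoc (ws : List (List Char)) (w : List Char) (h : ws ≠ []) :
    PySem.Chars.join ['-'] (ws ++ [w]) = PySem.Chars.join ['-'] ws ++ '-' :: w := by
  induction ws with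
  | nil => exact absurd rfl h
  | cons a t ih =>
    cases t with
    | nil => simp [pv_join_cons a [w] (by simp), PySem.Chars.join_singleton, PySem.Chars.join_nil]
    | cons b t' =>
      rw [List.cons_append, pv_join_cons a ((b :: t') ++ [w]) (by simp),
          pv_join_cons a (b :: t') (by simp), ih (by simp)]
      simp

-- extending the last word extends the join at the end
theorem pv_join_last_append (ws : List (List Char)) (w x : List Char) :
    PySem.Chars.join ['-'] (ws ++ [w ++ x]) = PySem.Chars.join ['-'] (ws ++ [w]) ++ x := by
  induction ws with
  | nil => simp [PySem.Chars.join_singleton]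
  | cons a t ih =>
    rw [List.cons_append, List.cons_append, pv_join_cons a (t ++ [w ++ x]) (by simp),
        pv_join_cons a (t ++ [w]) (by simp), ih]
    simp

-- the loop invariant: folding A's step and then joining equals the join so far
-- followed by B's per-character emissions
theorem pv_core (cs : List Char) (acc : List (List Char)) (cur : List Char) :
    PySem.Chars.join ['-']
        (((cs.foldl pvStepA (acc, cur)).1 ++ [(cs.foldl pvStepA (acc, cur)).2]).map PySem.Chars.lower)
      = PySem.Chars.join ['-'] ((acc ++ [cur]).map PySem.Chars.lower) ++ cs.flatMap pvEmitB := by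
  induction cs generalizing acc cur with
  | nil => simp
  | cons l t ih =>
    simp only [List.foldl_cons, List.flatMap_cons, pvStepA, pvEmitB]
    by_cases hu : PySem.Chars.isupper l = true
    · rw [if_pos hu, if_pos hu, ih]
      rw [show ((acc ++ [cur]) ++ [[l]]).map PySem.Chars.lower
            = ((acc ++ [cur]).map PySem.Chars.lower) ++ [PySem.Chars.lower [l]] by simp,
          pv_join_snoc _ _ (by simp)]
      simp [PySem.Chars.lower]
    · rw [if_neg hu, if_neg hu, ih]
      rw [show (acc ++ [cur ++ [l]]).map PySem.Chars.lower
            = (acc.map PySem.Chars.lower) ++ [PySem.Chars.lower cur ++ [PySem.Chars.lowerChar l]] by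
              simp [PySem.Chars.lower],
          pv_join_last_append,
          show (acc.map PySem.Chars.lower) ++ [PySem.Chars.lower cur]
            = ((acc ++ [cur]).map PySem.Chars.lower) by simp]
      simp [pvEmitB, hu]

-- ===== VERDICT (by name: the statement is the Claim_ definition above) =====
theorem plugin_js_to_url_spec : Claim_equal_plugin_js_to_url := by
  intro p _ hpre
  obtain ⟨hsw, hlen⟩ := hpre
  unfold Spec_plugin_js_to_url plugin_js_to_url plugin_js_to_url_alt
  -- the prefix test succeeds
  have hpref : "jsPsych".toList <+: p.toList := by
    have := (PySem.Chars.startswith_iff p.toList "jsPsych".toList).mp (by simpa using hsw)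
    exact this
  obtain ⟨t, ht⟩ := hpref
  have htake : PySem.List.slice p.toList none (some 7) = "jsPsych".toList := by
    rw [PySem.List.slice_to (xs := p.toList) (b := 7) (by norm_num), ← ht]
    simp [← ht]
  have hdrop : PySem.List.slice p.toList (some 7) none = t := by
    rw [PySem.List.slice_from (xs := p.toList) (a := 7) (by norm_num), ← ht]
    simp [← ht]
  have htlen : 1 ≤ t.length := by
    have : p.toList.length = 7 + t.length := by rw [← ht]; simp; omega
    omega
  obtain ⟨c0, cs, rfl⟩ : ∃ c0 cs, t = c0 :: cs := by
    cases t with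
    | nil => simp at htlen
    | cons a b => exact ⟨a, b, rfl⟩
  simp only [htake, hdrop, if_pos rfl]
  have hget : PySem.List.pyGet? (c0 :: cs) (0 : Int) = some c0 := by
    simp [PySem.List.pyGet?_natCast]
  simp only [hget]
  have htail : PySem.List.slice (c0 :: cs) (some 1) none = cs := by
    rw [PySem.List.slice_from (xs := c0 :: cs) (a := 1) (by norm_num)]; simp
  simp only [htail]
  have := pv_core cs [] [c0]
  rw [this]
  simp [PySem.Chars.join_singleton, PySem.Chars.lower]
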